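-- pv_equiv track=rewrite | github.com/willWallace-RIT/LegendAIry | src/train_embeddings.py | group_by_character
-- ===== SOURCE A (Python) =====
-- def group_by_character(data):
--     char_lines = {}
--     for item in data:
--         char = item["speaker"]
--         if char not in char_lines:
--             char_lines[char] = []
--         char_lines[char].append(item["text"])
--     return char_lines
-- ===== SOURCE B (Python) =====
-- def group_by_character(data):
--     # Two-pass: distinct speakers in first-occurrence order, then one scan per speaker.
--     speakers = list(dict.fromkeys(item["speaker"] for item in data))
--     return {s: [item["text"] for item in data if item["speaker"] == s]
--             for s in speakers}
-- ===== Notes on version B (the rewrite author's own statement) =====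
-- stated objective: alternative
-- what changed: Replaces the single-pass dict-accumulator grouping with a two-phase plan: first collect the distinct speakers in first-occurrence order, then build the result as a dict comprehension that rescans the data once per speaker.
import Mathlib
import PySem

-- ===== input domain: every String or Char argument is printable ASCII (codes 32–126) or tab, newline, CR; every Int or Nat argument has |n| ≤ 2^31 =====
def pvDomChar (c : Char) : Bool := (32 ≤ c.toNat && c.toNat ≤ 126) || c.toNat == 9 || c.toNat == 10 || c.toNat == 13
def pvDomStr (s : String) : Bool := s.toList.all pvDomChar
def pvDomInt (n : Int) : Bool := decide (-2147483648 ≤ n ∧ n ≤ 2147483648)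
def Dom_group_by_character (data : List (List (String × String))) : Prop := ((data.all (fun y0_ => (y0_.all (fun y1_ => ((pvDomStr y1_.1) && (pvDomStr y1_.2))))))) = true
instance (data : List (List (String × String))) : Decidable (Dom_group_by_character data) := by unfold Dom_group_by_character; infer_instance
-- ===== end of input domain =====

-- B groups by a different plan (alternative, not faster): first the distinct speakers in
-- first-occurrence order, then one scan of the data per speaker; A does one pass with a
-- dict accumulator. Same return value.

-- item["speaker"] / item["text"] (an item is a Python dict). The .getD "" default is never
-- reached inside Pre_ (both keys present); outside Pre_ Python raises KeyError.
def pvSpk (item : List (String × String)) : String :=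
  ((PySem.Dict.mk item).get? "speaker").getD ""
def pvTxt (item : List (String × String)) : String :=
  ((PySem.Dict.mk item).get? "text").getD ""

-- ===== PORT A =====
def group_by_character (data : List (List (String × String))) : List (String × List String) :=
  (data.foldl (fun char_lines item =>
      let char := pvSpk item
      -- if char not in char_lines: char_lines[char] = []
      let char_lines' := if char_lines.contains char then char_lines else char_lines.insert char []
      -- char_lines[char].append(item["text"])   (key present; the [] default is unreachable)
      char_lines'.modify char [] (fun v => v ++ [pvTxt item]))
    PySem.Dict.empty).items

-- ===== PORT B =====
def group_by_character_alt (data : List (List (String × String))) : List (String × List String) :=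
  let speakers := PySem.List.dedup (data.map pvSpk)
  speakers.map (fun s =>
    (s, (data.filter (fun item => pvSpk item == s)).map pvTxt))

-- ===== PRECONDITION & SPEC =====
-- Pre_ excludes items missing a "speaker" or "text" key, on which Python A raises KeyError.
def Pre_group_by_character (data : List (List (String × String))) : Prop :=
  ∀ item ∈ data, "speaker" ∈ item.map Prod.fst ∧ "text" ∈ item.map Prod.fst
instance (data : List (List (String × String))) : Decidable (Pre_group_by_character data) := by
  unfold Pre_group_by_character; infer_instance

def pvWitness_group_by_character : (List (List (String × String))) :=
  [[("speaker", "Alice"), ("text", "hi")], [("speaker", "Bob"), ("text", "yo")],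
   [("speaker", "Alice"), ("text", "bye")]]

def Spec_group_by_character (data : List (List (String × String))) (out : List (String × List String)) : Prop := out = group_by_character_alt data
instance (data : List (List (String × String))) (out : List (String × List String)) : Decidable (Spec_group_by_character data out) := by unfold Spec_group_by_character; infer_instance

-- ===== CLAIM (what is proved, stated in full; the proofs are below) =====
def Claim_equal_group_by_character : Prop := ∀ (data : List (List (String × String))), Dom_group_by_character data → Pre_group_by_character data → Spec_group_by_character data (group_by_character data)

-- ===== LEMMAS AND PROOFS =====

-- overwriting a just-inserted key overwrites in place
lemma insert_insert (d : PySem.Dict String (List String)) (k : String) (v w : List String) :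
    (d.insert k v).insert k w = d.insert k w := by
  apply PySem.Dict.ext
  by_cases h : d.contains k = true
  · simp [PySem.Dict.items_insert_of_contains, h, PySem.Dict.contains_insert_self, List.map_map]
    intro a b hab
    by_cases hk : a = k <;> simp [hk]
  · simp only [Bool.not_eq_true] at h
    have hnk : ∀ p ∈ d.items, p.1 ≠ k := by
      intro p hp hc
      have : k ∈ d.keys := by
        rw [show d.keys = d.items.map Prod.fst from rfl]
        exact hc ▸ List.mem_map_of_mem hp
      rw [← PySem.Dict.contains_iff_mem_keys] at this
      simp [h] at this
    rw [PySem.Dict.items_insert_of_contains (h := by simp),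
        PySem.Dict.items_insert_of_not_contains (h := h),
        PySem.Dict.items_insert_of_not_contains (h := h)]
    simp
    apply (List.map_congr_left ?_).trans (List.map_id _)
    intro p hp; simp [hnk p hp]

-- A's loop body: inserting an empty list before appending is the same as a bare modify
lemma step_eq (d : PySem.Dict String (List String)) (c t : String) :
    (if d.contains c then d else d.insert c []).modify c [] (fun v => v ++ [t])
      = d.modify c [] (fun v => v ++ [t]) := by
  by_cases h : d.contains c = true
  · simp [h]
  · simp only [Bool.not_eq_true] at h
    rw [if_neg (by simp [h])]
    simp [PySem.Dict.modify, PySem.Dict.getD_insert_self,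
      PySem.Dict.getD_of_not_contains (h := h), insert_insert]

-- a dict with distinct keys is its keys paired with their values
lemma items_eq_keys_map (d : PySem.Dict String (List String)) (h : d.keys.Nodup) :
    d.items = d.keys.map (fun k => (k, d.getD k [])) := by
  rw [show d.keys = d.items.map Prod.fst from rfl, List.map_map]
  symm
  apply (List.map_congr_left ?_).trans (List.map_id _)
  intro p hp
  simp only [Function.comp]
  exact Prod.ext rfl (PySem.Dict.getD_of_mem_items _ (k := p.1) (v := p.2) (by simpa using hp) h [])

-- ===== VERDICT (by name: the statement is the Claim_ definition above) =====
theorem group_by_character_spec : Claim_equal_group_by_character := by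
  intro data _ _
  unfold Spec_group_by_character
  have hfold : group_by_character data
      = (data.foldl (fun d item => d.modify (pvSpk item) [] (fun v => v ++ [pvTxt item]))
          PySem.Dict.empty).items := by
    unfold group_by_character
    congr 1
    exact PySem.List.foldl_congr_mem _ _ _ _ (fun acc x _ => step_eq acc (pvSpk x) (pvTxt x))
  set D := data.foldl (fun d item => d.modify (pvSpk item) [] (fun v => v ++ [pvTxt item]))
      PySem.Dict.empty with hD
  have hnodup : D.keys.Nodup :=
    PySem.Dict.nodup_keys_foldl_modify_key data pvSpk [] (fun _ x => fun v => v ++ [pvTxt x]) _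
      (by simp)
  have hkeys : D.keys = PySem.List.dedup (data.map pvSpk) := by
    rw [hD, PySem.Dict.keys_foldl_modify_key]
    simp [PySem.Dict.keys_empty, PySem.List.dedup_eq_ofList, PySem.Set.ofList_eq_foldl,
      PySem.Set.update]
  have hget : ∀ s, D.getD s [] = (data.filter (fun item => pvSpk item == s)).map pvTxt := by
    intro s
    have hmap : D = (data.map (fun it => (pvSpk it, pvTxt it))).foldl
        (fun d p => d.modify p.1 [] (fun v => v ++ [p.2])) PySem.Dict.empty := by
      rw [hD, List.foldl_map]
    rw [hmap, PySem.Dict.getD_foldl_modify_append]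
    simp [PySem.Dict.getD_empty, List.filter_map, List.map_map, Function.comp_def]
  rw [hfold, items_eq_keys_map D hnodup, hkeys]
  unfold group_by_character_alt
  exact (List.map_congr_left (fun s _ => by rw [hget s])).symm
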